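-- pv_equiv track=rewrite | github.com/nssathish/adventofcode20xx | 2024/advent_of_code_prob_2.py | is_under_adjacent_threshold_limit
-- ===== SOURCE A (Python) =====
-- def is_under_adjacent_threshold_limit(
--     threshold: int, arr: list[int], tolerate_single_bad_level: bool = False
-- ) -> bool:
--     """
--         Determines if the differences between adjacent elements in a list are within a specified threshold.
--
--         Args:
--             threshold (int): The maximum allowable difference between adjacent elements.
--             arr (list[int]): The list of integers to evaluate.
--             tolerate_single_bad_level (bool, optional): If True, allows one instance of a difference
--                 exceeding the threshold by removing the offending element and re-evaluating.
--                 Defaults to False.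
--
--         Returns:
--             bool: True if all adjacent differences are within the threshold (or within tolerance
--             if `tolerate_single_bad_level` is True), otherwise False.
--     """
--     for i in range(len(arr) - 1):
--         difference = abs(arr[i] - arr[i + 1])
--         if difference == 0 or difference > threshold:
--             if tolerate_single_bad_level:
--                 del arr[i + 1]
--                 return is_under_adjacent_threshold_limit(threshold, arr)
--             else:
--                 return False
--
--     return True
-- ===== SOURCE B (Python) =====
-- def is_under_adjacent_threshold_limit(
--     threshold: int, arr: list[int], tolerate_single_bad_level: bool = False
-- ) -> bool:
--     # Single pass, no deletion/rescan: on the first bad pair, if the one-shot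
--     # spare is available, skip the current element (keep comparing against prev).
--     # Does NOT mutate arr (A deletes in place); return value is identical.
--     if not arr:
--         return True
--     prev = arr[0]
--     spare = tolerate_single_bad_level
--     for cur in arr[1:]:
--         d = abs(prev - cur)
--         if d == 0 or d > threshold:
--             if not spare:
--                 return False
--             spare = False
--         else:
--             prev = cur
--     return True
-- ===== Notes on version B (the rewrite author's own statement) =====
-- stated objective: alternative
-- what changed: Replaces A's scan + in-place delete + full recursive rescan by a single forward pass carrying (prev, one-shot spare flag): a bad pair either consumes the spare (skipping the current element) or fails immediately; no mutation, no second pass.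
import Mathlib
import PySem

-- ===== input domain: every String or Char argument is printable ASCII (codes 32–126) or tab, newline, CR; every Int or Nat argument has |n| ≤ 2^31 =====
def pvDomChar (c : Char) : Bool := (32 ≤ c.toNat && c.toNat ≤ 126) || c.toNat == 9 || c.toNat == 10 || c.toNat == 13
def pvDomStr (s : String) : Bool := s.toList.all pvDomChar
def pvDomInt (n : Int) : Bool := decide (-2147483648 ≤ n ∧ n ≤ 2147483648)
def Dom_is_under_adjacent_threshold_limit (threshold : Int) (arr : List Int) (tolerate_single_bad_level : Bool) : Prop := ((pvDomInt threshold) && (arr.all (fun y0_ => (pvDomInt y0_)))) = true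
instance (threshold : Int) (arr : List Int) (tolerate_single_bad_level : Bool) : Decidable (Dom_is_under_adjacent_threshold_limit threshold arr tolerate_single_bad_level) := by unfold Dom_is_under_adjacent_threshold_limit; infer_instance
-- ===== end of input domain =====

-- B replaces A's scan + in-place delete + recursive full rescan by ONE forward pass with a
-- (prev, one-shot spare) state (objective: alternative). A mutates `arr` in place when tolerating;
-- B does not: the equivalence proved here is about the RETURN value only.

-- ===== PORT A =====
-- Index loop `for i in range(len(arr) - 1)` ported as recursion on i; arr[i] / arr[i+1] are always
-- in range (0 ≤ i < i+1 < len), so List.getD is exact there.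
def is_under_go (threshold : Int) (arr : List Int) (tolerate_single_bad_level : Bool) (i : Nat) : Bool :=
  if h : i + 1 < arr.length then
    let difference := |arr.getD i 0 - arr.getD (i + 1) 0|
    if difference == 0 || difference > threshold then
      if tolerate_single_bad_level then
        is_under_go threshold (arr.eraseIdx (i + 1)) false 0
      else
        false
    else
      is_under_go threshold arr tolerate_single_bad_level (i + 1)
  else
    true
termination_by (arr.length, arr.length - i)
decreasing_by
  · exact Prod.Lex.left _ _ (by rw [List.length_eraseIdx, if_pos h]; omega)
  · exact Prod.Lex.right _ (by omega)

def is_under_adjacent_threshold_limit (threshold : Int) (arr : List Int) (tolerate_single_bad_level : Bool) : Bool :=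
  is_under_go threshold arr tolerate_single_bad_level 0

-- ===== PORT B =====
-- the `for cur in arr[1:]` loop with accumulator state (prev, spare)
def alt_loop (threshold : Int) : List Int → Int → Bool → Bool
  | [], _, _ => true
  | cur :: rest, prev, spare =>
    let d := |prev - cur|
    if d == 0 || d > threshold then
      if !spare then false else alt_loop threshold rest prev false
    else
      alt_loop threshold rest cur spare

def is_under_adjacent_threshold_limit_alt (threshold : Int) (arr : List Int) (tolerate_single_bad_level : Bool) : Bool :=
  match arr with
  | [] => true
  | a :: rest => alt_loop threshold rest a tolerate_single_bad_level

-- ===== PRECONDITION & SPEC =====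
def Spec_is_under_adjacent_threshold_limit (threshold : Int) (arr : List Int) (tolerate_single_bad_level : Bool) (out : Bool) : Prop := out = is_under_adjacent_threshold_limit_alt threshold arr tolerate_single_bad_level
instance (threshold : Int) (arr : List Int) (tolerate_single_bad_level : Bool) (out : Bool) : Decidable (Spec_is_under_adjacent_threshold_limit threshold arr tolerate_single_bad_level out) := by unfold Spec_is_under_adjacent_threshold_limit; infer_instance

-- ===== CLAIM (what is proved, stated in full; the proofs are below) =====
def Claim_equal_is_under_adjacent_threshold_limit : Prop := ∀ (threshold : Int) (arr : List Int) (tolerate_single_bad_level : Bool), Dom_is_under_adjacent_threshold_limit threshold arr tolerate_single_bad_level → Spec_is_under_adjacent_threshold_limit threshold arr tolerate_single_bad_level (is_under_adjacent_threshold_limit threshold arr tolerate_single_bad_level)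

-- ===== LEMMAS AND PROOFS =====

-- proof-only characterisation: index of the first bad adjacent pair, if any
def fb (threshold : Int) : List Int → Option Nat
  | x :: y :: rest =>
    let d := |x - y|
    if d == 0 || d > threshold then some 0
    else (fb threshold (y :: rest)).map (· + 1)
  | _ => none

lemma fb_none_of_short (threshold : Int) (l : List Int) (h : l.length ≤ 1) :
    fb threshold l = none := by
  match l, h with
  | [], _ => rfl
  | [x], _ => rfl

lemma fb_drop (threshold : Int) (arr : List Int) (i : Nat) (h : i + 1 < arr.length) :
    fb threshold (arr.drop i) =
      if (|arr.getD i 0 - arr.getD (i + 1) 0| == 0 || decide (|arr.getD i 0 - arr.getD (i + 1) 0| > threshold)) = true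
      then some 0
      else (fb threshold (arr.drop (i + 1))).map (· + 1) := by
  have hi : i < arr.length := by omega
  have h1 : arr.drop i = arr[i] :: arr.drop (i + 1) := List.drop_eq_getElem_cons hi
  have h2 : arr.drop (i + 1) = arr[i + 1] :: arr.drop (i + 2) := List.drop_eq_getElem_cons h
  rw [h1]
  conv_lhs => rw [h2]
  simp only [fb, List.getD_eq_getElem _ _ hi, List.getD_eq_getElem _ _ h]
  split_ifs with h3
  · rfl
  · rw [← h2]

-- A's loop, characterised by fb
lemma go_eq_fb (threshold : Int) (arr : List Int) (tol : Bool) (i : Nat) :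
    is_under_go threshold arr tol i =
      match fb threshold (arr.drop i) with
      | none => true
      | some j => if tol then is_under_go threshold (arr.eraseIdx (i + j + 1)) false 0 else false := by
  by_cases h : i + 1 < arr.length
  · rw [fb_drop threshold arr i h]
    rw [is_under_go, dif_pos h]
    by_cases hbad : (|arr.getD i 0 - arr.getD (i + 1) 0| == 0 || decide (|arr.getD i 0 - arr.getD (i + 1) 0| > threshold)) = true
    · simp only [hbad, if_true]
    · rw [Bool.not_eq_true] at hbad
      simp only [hbad, Bool.false_eq_true, if_false]
      rw [go_eq_fb threshold arr tol (i + 1)]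
      cases fb threshold (arr.drop (i + 1)) with
      | none => simp
      | some j =>
        simp only [Option.map_some]
        have hidx : i + 1 + j + 1 = i + (j + 1) + 1 := by omega
        rw [hidx]
  · rw [is_under_go, dif_neg h]
    have hs : fb threshold (arr.drop i) = none :=
      fb_none_of_short threshold _ (by simp only [List.length_drop]; omega)
    rw [hs]
termination_by (arr.length, arr.length - i)
decreasing_by
  exact Prod.Lex.right _ (by omega)

-- B's loop with the spare consumed = "no bad pair at all"
lemma alt_loop_false (threshold : Int) (rest : List Int) (prev : Int) :
    alt_loop threshold rest prev false = (fb threshold (prev :: rest)).isNone := by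
  induction rest generalizing prev with
  | nil => simp [alt_loop, fb]
  | cons cur rest' ih =>
    simp only [alt_loop, fb]
    by_cases hbad : (|prev - cur| == 0 || decide (|prev - cur| > threshold)) = true
    · simp [hbad]
    · rw [Bool.not_eq_true] at hbad
      simp only [hbad, Bool.false_eq_true, if_false, ih]
      cases fb threshold (cur :: rest') <;> simp

-- B's loop with the spare live, characterised by fb before and after the skip
lemma alt_loop_true (threshold : Int) (rest : List Int) (prev : Int) :
    alt_loop threshold rest prev true =
      match fb threshold (prev :: rest) with
      | none => true
      | some j => (fb threshold ((prev :: rest).eraseIdx (j + 1))).isNone := by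
  induction rest generalizing prev with
  | nil => simp [alt_loop, fb]
  | cons cur rest' ih =>
    simp only [alt_loop, fb]
    by_cases hbad : (|prev - cur| == 0 || decide (|prev - cur| > threshold)) = true
    · -- bad pair now: skip cur, spare consumed; erasing index 1 gives prev :: rest'
      simp only [hbad, if_true, Bool.not_true, Bool.false_eq_true, if_false]
      rw [alt_loop_false]
      rfl
    · rw [Bool.not_eq_true] at hbad
      simp only [hbad, Bool.false_eq_true, if_false, ih]
      cases hfb : fb threshold (cur :: rest') with
      | none => simp
      | some j =>
        simp only [Option.map_some]
        -- (prev :: cur :: rest').eraseIdx (j+2) = prev :: (cur :: rest').eraseIdx (j+1)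
        show (fb threshold ((cur :: rest').eraseIdx (j + 1))).isNone
            = (fb threshold (prev :: (cur :: rest').eraseIdx (j + 1))).isNone
        cases hx : (cur :: rest').eraseIdx (j + 1) with
        | nil => simp [fb]
        | cons c2 t2 =>
          have hc2 : c2 = cur := by
            cases rest' with
            | nil => simp [List.eraseIdx] at hx; omega
            | cons z zs => simp [List.eraseIdx] at hx; exact hx.1.symm
          subst hc2
          simp [fb, hbad]

-- ===== VERDICT (by name: the statement is the Claim_ definition above) =====
theorem is_under_adjacent_threshold_limit_spec : Claim_equal_is_under_adjacent_threshold_limit := by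
  intro threshold arr tol _
  unfold Spec_is_under_adjacent_threshold_limit is_under_adjacent_threshold_limit
    is_under_adjacent_threshold_limit_alt
  cases arr with
  | nil => rw [go_eq_fb]; simp [fb]
  | cons a rest =>
    rw [go_eq_fb]
    simp only [List.drop_zero]
    cases tol with
    | false =>
      rw [alt_loop_false]
      cases fb threshold (a :: rest) <;> simp
    | true =>
      rw [alt_loop_true]
      cases hfb : fb threshold (a :: rest) with
      | none => simp
      | some j =>
        simp only [if_true]
        rw [go_eq_fb]
        simp only [Nat.zero_add, List.drop_zero]
        cases fb threshold ((a :: rest).eraseIdx (j + 1)) <;> simp
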